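-- pv_equiv track=rewrite | github.com/Hitikov/DiskretMath_Lab2 | Relations/checking.py | check_reflexivity
-- ===== SOURCE A (Python) =====
-- def check_reflexivity (matrix, power):
--     reflexivity = True
--     antireflexivity = True
--
--     for i in range(power):
--         if matrix[i][i] == 1:
--             antireflexivity = False
--         if matrix[i][i] == 0:
--             reflexivity = False
--
--     if reflexivity:
--         return 1
--     if antireflexivity:
--         return -1
--     return 0
-- ===== SOURCE B (Python) =====
-- def check_reflexivity(matrix, power):
--     # Staged early-exit searches instead of one full pass with two flags:
--     # find the first diagonal zero; if none, reflexive. Otherwise search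
--     # for any diagonal one: none -> antireflexive, some -> neither.
--     zero_pos = next((i for i in range(power) if matrix[i][i] == 0), None)
--     if zero_pos is None:
--         return 1
--     one_pos = next((j for j in range(power) if matrix[j][j] == 1), None)
--     return -1 if one_pos is None else 0
-- ===== Notes on version B (the rewrite author's own statement) =====
-- stated objective: alternative
-- what changed: B replaces A's single full pass maintaining two boolean flags by two staged early-exit searches: find the first diagonal zero (none -> 1), then search for any diagonal one (none -> -1, some -> 0).
import Mathlib
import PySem

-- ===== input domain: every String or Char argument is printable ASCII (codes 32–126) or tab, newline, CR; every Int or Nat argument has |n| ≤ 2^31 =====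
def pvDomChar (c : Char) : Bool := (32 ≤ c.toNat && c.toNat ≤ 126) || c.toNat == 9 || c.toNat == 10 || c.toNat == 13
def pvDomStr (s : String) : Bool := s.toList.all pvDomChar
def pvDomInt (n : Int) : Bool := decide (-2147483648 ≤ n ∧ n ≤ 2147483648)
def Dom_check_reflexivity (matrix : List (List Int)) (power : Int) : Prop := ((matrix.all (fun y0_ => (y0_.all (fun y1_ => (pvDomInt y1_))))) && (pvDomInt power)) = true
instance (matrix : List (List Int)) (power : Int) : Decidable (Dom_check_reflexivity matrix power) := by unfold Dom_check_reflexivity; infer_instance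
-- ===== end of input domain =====

-- ===== PORT A =====
-- B replaces A's single two-flag pass by two staged early-exit searches; objective: alternative.
-- shared indexing helper: matrix[i][i] (defaults are unreachable under Pre_)
def pvDiagAt (matrix : List (List Int)) (i : Int) : Int :=
  (((PySem.List.pyGet? matrix i).getD []) |> (fun r => PySem.List.pyGet? r i)).getD 2

def check_reflexivity (matrix : List (List Int)) (power : Int) : Int :=
  let st := (PySem.List.pyRange 0 power 1).foldl
    (fun (p : Bool × Bool) i =>
      let v := pvDiagAt matrix i
      (if v == 0 then false else p.1, if v == 1 then false else p.2))
    (true, true)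
  if st.1 then 1 else if st.2 then -1 else 0

-- ===== PORT B =====
def check_reflexivity_alt (matrix : List (List Int)) (power : Int) : Int :=
  match (PySem.List.pyRange 0 power 1).find? (fun i => pvDiagAt matrix i == 0) with
  | none => 1
  | some _ =>
    match (PySem.List.pyRange 0 power 1).find? (fun j => pvDiagAt matrix j == 1) with
    | none => -1
    | some _ => 0

-- ===== PRECONDITION & SPEC =====
-- Pre_ excludes exactly the inputs where A raises IndexError: some i in range(power) with matrix[i][i] out of range.
def Pre_check_reflexivity (matrix : List (List Int)) (power : Int) : Prop :=
  power ≤ matrix.length ∧ ∀ i < power.toNat, i < (matrix.getD i []).length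
instance (matrix : List (List Int)) (power : Int) : Decidable (Pre_check_reflexivity matrix power) := by unfold Pre_check_reflexivity; infer_instance
def pvWitness_check_reflexivity : List (List Int) × Int := ([[1, 0], [0, 1]], 2)
def Spec_check_reflexivity (matrix : List (List Int)) (power : Int) (out : Int) : Prop := out = check_reflexivity_alt matrix power
instance (matrix : List (List Int)) (power : Int) (out : Int) : Decidable (Spec_check_reflexivity matrix power out) := by unfold Spec_check_reflexivity; infer_instance

-- ===== CLAIM (what is proved, stated in full; the proofs are below) =====
def Claim_equal_check_reflexivity : Prop := ∀ (matrix : List (List Int)) (power : Int), Dom_check_reflexivity matrix power → Pre_check_reflexivity matrix power → Spec_check_reflexivity matrix power (check_reflexivity matrix power)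

-- ===== LEMMAS AND PROOFS =====
theorem pvFold_flags (l : List Int) (b1 b2 : Bool) :
    l.foldl (fun (p : Bool × Bool) v =>
      (if v == 0 then false else p.1, if v == 1 then false else p.2)) (b1, b2)
    = (b1 && !(l.contains 0), b2 && !(l.contains 1)) := by
  induction l generalizing b1 b2 with
  | nil => simp
  | cons x xs ih =>
    simp only [List.foldl_cons, List.contains_cons, ih]
    by_cases c0 : x = 0 <;> by_cases c1 : x = 1
    · simp_all
    · simp_all
    · simp_all
    · have d0 : ((0 : Int) == x) = false := by simp; omega
      have d1 : ((1 : Int) == x) = false := by simp; omega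
      simp [d0, d1, c0, c1]

theorem pvFind_none_iff (l : List Int) (f : Int → Int) (a : Int) :
    (l.find? (fun i => f i == a) = none) ↔ ((l.map f).contains a = false) := by
  induction l with
  | nil => simp
  | cons x xs ih =>
    by_cases hx : f x = a
    · simp [hx]
    · have hfx : (f x == a) = false := by simp [hx]
      simp only [List.map_cons, List.contains_cons, List.find?_cons, hfx,
        Bool.or_eq_false_iff, ih]
      constructor
      · exact fun h => ⟨by simp [Ne.symm hx], h⟩
      · exact fun h => h.2

-- ===== VERDICT (by name: the statement is the Claim_ definition above) =====
theorem check_reflexivity_spec : Claim_equal_check_reflexivity := by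
  intro matrix power _ _
  unfold Spec_check_reflexivity check_reflexivity check_reflexivity_alt
  have h := List.foldl_map (f := pvDiagAt matrix)
    (g := fun (p : Bool × Bool) v =>
      (if v == 0 then false else p.1, if v == 1 then false else p.2))
    (l := PySem.List.pyRange 0 power 1) (init := ((true, true) : Bool × Bool))
  rw [pvFold_flags, Bool.true_and, Bool.true_and] at h
  rw [← h]
  rcases h0 : (PySem.List.pyRange 0 power 1).find? (fun i => pvDiagAt matrix i == 0) with _ | v0
  · have c0 := (pvFind_none_iff _ _ _).mp h0
    rw [c0]
    simp
  · have c0 : ((PySem.List.pyRange 0 power 1).map (pvDiagAt matrix)).contains 0 = true := by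
      by_contra hc
      rw [(pvFind_none_iff (PySem.List.pyRange 0 power 1) (pvDiagAt matrix) 0).mpr
        (Bool.eq_false_iff.mpr hc)] at h0
      simp at h0
    rcases h1 : (PySem.List.pyRange 0 power 1).find? (fun j => pvDiagAt matrix j == 1) with _ | v1
    · have c1 := (pvFind_none_iff _ _ _).mp h1
      rw [c0, c1]
      simp
    · have c1 : ((PySem.List.pyRange 0 power 1).map (pvDiagAt matrix)).contains 1 = true := by
        by_contra hc
        rw [(pvFind_none_iff (PySem.List.pyRange 0 power 1) (pvDiagAt matrix) 1).mpr
          (Bool.eq_false_iff.mpr hc)] at h1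
        simp at h1
      rw [c0, c1]
      simp
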